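-- pv_equiv track=rewrite | github.com/tpguarnieri/advent_of_code_2025 | day_2/day_2.py | is_equal_partitions
-- ===== SOURCE A (Python) =====
-- def is_equal_partitions(s, size):
--     # Partition string
--     partitions = []
--     for i in range(0, len(s), size):
--         partitions.append(s[i:i+size])
--
--     # Checks if all partitions equal
--     for partition in partitions:
--         if partition != partitions[0]:
--             return False
--     return True
-- ===== SOURCE B (Python) =====
-- def is_equal_partitions(s, size):
--     # Number of chunks A would build (len(range(...)) raises on size == 0, like A).
--     m = len(range(0, len(s), size))
--     # Empty chunk list (empty s, or negative size) -> trivially equal.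
--     # Otherwise all chunks equal the first iff s is the first chunk repeated m times.
--     return m == 0 or s == s[:size] * m
-- ===== Notes on version B (the rewrite author's own statement) =====
-- stated objective: simpler
-- what changed: B replaces A's build-a-list-of-chunks-then-scan with a single comparison: the string equals its first size-chunk repeated m times, where m = len(range(0, len(s), size)) is the chunk count (and m == 0 short-circuits to True).
import Mathlib
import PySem

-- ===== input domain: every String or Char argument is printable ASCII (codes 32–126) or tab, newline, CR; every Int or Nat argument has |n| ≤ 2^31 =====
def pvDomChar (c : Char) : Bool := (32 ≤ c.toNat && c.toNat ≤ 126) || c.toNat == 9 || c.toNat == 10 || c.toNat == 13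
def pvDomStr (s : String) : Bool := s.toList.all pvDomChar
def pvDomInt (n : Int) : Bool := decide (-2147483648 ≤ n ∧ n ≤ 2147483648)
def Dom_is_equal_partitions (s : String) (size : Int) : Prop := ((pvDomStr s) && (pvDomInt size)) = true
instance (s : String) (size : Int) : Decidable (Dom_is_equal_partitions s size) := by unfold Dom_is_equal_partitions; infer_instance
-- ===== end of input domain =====

-- B checks `s == s[:size] * m` (m = number of chunks) in one comparison instead of
-- building a list of chunks and scanning it; return-value equivalence is proved below.

-- ===== PORT A =====
-- second Python loop: 'for partition in partitions: if partition != partitions[0]: return False'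
def pvPartLoop (p0 : String) : List String → Bool
  | [] => true
  | p :: rest => if p ≠ p0 then false else pvPartLoop p0 rest

-- the scan over the built list; for a nonempty list partitions[0] is its head,
-- for an empty list the loop body (and partitions[0]) is never evaluated
def pvPartitionsCheck : List String → Bool
  | [] => true
  | p0 :: rest => pvPartLoop p0 (p0 :: rest)

def is_equal_partitions (s : String) (size : Int) : Bool :=
  pvPartitionsCheck
    ((PySem.List.pyRange 0 (PySem.Str.len s) size).map
      (fun i => PySem.Str.slice s (some i) (some (i + size))))

-- ===== PORT B =====
def is_equal_partitions_alt (s : String) (size : Int) : Bool :=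
  let m : Int := ((PySem.List.pyRange 0 (PySem.Str.len s) size).length : Int)
  -- `s[:size] * m` ported by hand: Python string repetition = pyRepeat on the code points (exact)
  m == 0 || s == String.ofList (PySem.List.pyRepeat (PySem.Str.slice s none (some size)).toList m)

-- ===== PRECONDITION & SPEC =====
-- Pre_ excludes only size == 0, where A's range(0, len(s), 0) raises ValueError (and so does B's).
def Pre_is_equal_partitions (s : String) (size : Int) : Prop := size ≠ 0
instance (s : String) (size : Int) : Decidable (Pre_is_equal_partitions s size) := by
  unfold Pre_is_equal_partitions; infer_instance

def pvWitness_is_equal_partitions : String × Int := ("abab", 2)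

def Spec_is_equal_partitions (s : String) (size : Int) (out : Bool) : Prop := out = is_equal_partitions_alt s size
instance (s : String) (size : Int) (out : Bool) : Decidable (Spec_is_equal_partitions s size out) := by unfold Spec_is_equal_partitions; infer_instance

-- ===== CLAIM (what is proved, stated in full; the proofs are below) =====
def Claim_equal_is_equal_partitions : Prop := ∀ (s : String) (size : Int), Dom_is_equal_partitions s size → Pre_is_equal_partitions s size → Spec_is_equal_partitions s size (is_equal_partitions s size)

-- ===== LEMMAS AND PROOFS =====

-- range(0, n, s) is empty for a negative step and 0 ≤ n
theorem pvRange_neg_nil (n s : Int) (hs : s < 0) (hn : 0 ≤ n) :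
    PySem.List.pyRange 0 n s = [] := by
  simp [PySem.List.pyRange, show ¬ s = 0 by omega, show ¬ (0:Int) < s by omega,
        show ¬ n < 0 by omega]

-- range(0, b, s) is empty for a positive step and b ≤ 0
theorem pvRange_pos_nil (b s : Int) (hs : 0 < s) (hb : b ≤ 0) :
    PySem.List.pyRange 0 b s = [] := by
  rw [PySem.List.pyRange_of_pos _ _ hs, if_neg (by omega)]
  simp

-- range with positive step: peel the first element
theorem pvRange_cons (a b s : Int) (hs : 0 < s) (hab : a < b) :
    PySem.List.pyRange a b s = a :: PySem.List.pyRange (a + s) b s := by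
  rw [PySem.List.pyRange_of_pos _ _ hs, PySem.List.pyRange_of_pos _ _ hs]
  have hcount : (if a < b then ((b - a + s - 1) / s).toNat else 0)
      = (if a + s < b then ((b - (a + s) + s - 1) / s).toNat else 0) + 1 := by
    rw [if_pos hab]
    by_cases h2 : a + s < b
    · rw [if_pos h2]
      have e1 : b - a + s - 1 = (b - (a + s) + s - 1) + 1 * s := by ring
      rw [e1, Int.add_mul_ediv_right _ _ (by omega : s ≠ 0)]
      have hq : 0 ≤ (b - (a + s) + s - 1) / s := Int.ediv_nonneg (by omega) (by omega)
      omega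
    · rw [if_neg h2]
      have e1 : b - a + s - 1 = (b - a - 1) + 1 * s := by ring
      rw [e1, Int.add_mul_ediv_right _ _ (by omega : s ≠ 0),
          Int.ediv_eq_zero_of_lt (by omega) (by omega)]
      decide
  rw [hcount, List.range_succ_eq_map, List.map_cons, List.map_map]
  congr 1
  · simp
  · apply List.map_congr_left
    intro j _
    simp only [Function.comp_apply, Nat.succ_eq_add_one]
    push_cast
    ring

-- range with positive step: shift the bounds
theorem pvRange_shift (a b s t : Int) (hs : 0 < s) :
    PySem.List.pyRange (a + t) (b + t) s = (PySem.List.pyRange a b s).map (· + t) := by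
  rw [PySem.List.pyRange_of_pos _ _ hs, PySem.List.pyRange_of_pos _ _ hs, List.map_map]
  have h1 : (a + t < b + t) ↔ (a < b) := by omega
  rw [if_congr h1 rfl rfl, show b + t - (a + t) + s - 1 = b - a + s - 1 by ring]
  apply List.map_congr_left
  intro j _
  simp only [Function.comp_apply]
  ring

-- proof-side chunk list: [l[0:k], l[k:2k], …]
def pvChunks (k : Nat) (l : List Char) : List (List Char) :=
  if h : k = 0 ∨ l = [] then [] else l.take k :: pvChunks k (l.drop k)
termination_by l.length
decreasing_by
  push_neg at h
  have h1 : l.length ≠ 0 := by simpa using fun hh => h.2 (List.length_eq_zero_iff.mp hh)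
  simp only [List.length_drop]
  omega

theorem pvChunks_nil (k : Nat) : pvChunks k [] = [] := by
  rw [pvChunks]; simp

theorem pvChunks_cons (k : Nat) (hk : 0 < k) (l : List Char) (hl : l ≠ []) :
    pvChunks k l = l.take k :: pvChunks k (l.drop k) := by
  rw [pvChunks]; rw [dif_neg (by push_neg; exact ⟨by omega, hl⟩)]

-- A's partition list, seen on code points, is pvChunks
theorem pvParts_eq (k : Nat) (hk : 0 < k) :
    ∀ n (l : List Char), l.length ≤ n →
      (PySem.List.pyRange 0 (l.length : Int) (k : Int)).map
          (fun i => PySem.List.slice l (some i) (some (i + (k : Int)))) = pvChunks k l := by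
  intro n
  induction n with
  | zero =>
    intro l hl
    have : l = [] := List.length_eq_zero_iff.mp (by omega)
    subst this
    simp [pvChunks_nil, pvRange_pos_nil 0 k (by exact_mod_cast hk) le_rfl]
  | succ n ih =>
    intro l hl
    rcases eq_or_ne l [] with rfl | hne
    · simp [pvChunks_nil, pvRange_pos_nil 0 k (by exact_mod_cast hk) le_rfl]
    · have hlen : 0 < l.length := List.length_pos_iff.mpr hne
      rw [pvRange_cons 0 _ _ (by exact_mod_cast hk) (by exact_mod_cast hlen),
          pvChunks_cons k hk l hne, List.map_cons]
      congr 1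
      · rw [show (0:Int) + (k:Int) = (k:Int) by ring, PySem.List.slice_zero_start,
            PySem.List.slice_to _ (by positivity : (0:Int) ≤ (k:Int))]
        simp
      · by_cases hbig : (k:Nat) < l.length
        · have hsplit : PySem.List.pyRange (0 + (k:Int)) (l.length : Int) (k : Int)
              = (PySem.List.pyRange 0 ((l.length : Int) - k) (k:Int)).map (· + (k:Int)) := by
            have := pvRange_shift 0 ((l.length : Int) - k) (k:Int) (k:Int) (by exact_mod_cast hk)
            simpa using this
          rw [hsplit, List.map_map]
          have hdl : ((l.drop k).length : Int) = (l.length : Int) - k := by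
            simp [List.length_drop]; omega
          rw [← ih (l.drop k) (by simp [List.length_drop]; omega)]
          rw [hdl]
          apply List.map_congr_left
          intro i hi
          have hi0 : 0 ≤ i := by
            have := (PySem.List.mem_pyRange_iff_of_pos (by exact_mod_cast hk) i).mp hi
            omega
          simp only [Function.comp_apply]
          rw [PySem.List.slice_toNat _ (by omega) (by omega),
              PySem.List.slice_toNat _ (by omega) (by omega)]
          rw [List.drop_drop]
          congr 1
          · omega
          · congr 1; omega
        · have h1 : PySem.List.pyRange ((k:Int)) (l.length : Int) (k:Int) = [] := by
            rw [PySem.List.pyRange_of_pos _ _ (by exact_mod_cast hk : (0:Int) < (k:Int)),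
                if_neg (by exact_mod_cast hbig)]
            simp
          have h2 : l.drop k = [] := List.drop_eq_nil_of_le (by omega)
          simp [h1, h2, pvChunks_nil]

-- the heart: all chunks equal c (of length k) ⟺ l is c repeated (#chunks) times
theorem pvAllEqRepeat (k : Nat) (hk : 0 < k) (c : List Char) (hc : c.length = k) :
    ∀ n (l : List Char), l.length ≤ n →
      ((pvChunks k l).all (fun p => p == c))
        = (l == (List.replicate (pvChunks k l).length c).flatten) := by
  intro n
  induction n with
  | zero =>
    intro l hl
    have : l = [] := List.length_eq_zero_iff.mp (by omega)
    subst this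
    simp [pvChunks_nil]
  | succ n ih =>
    intro l hl
    rcases eq_or_ne l [] with rfl | hne
    · simp [pvChunks_nil]
    · rw [pvChunks_cons k hk l hne]
      simp only [List.all_cons, List.length_cons, List.replicate_succ, List.flatten_cons]
      rw [ih (l.drop k) (by simp [List.length_drop]; omega)]
      rw [Bool.eq_iff_iff]
      simp only [Bool.and_eq_true, beq_iff_eq]
      constructor
      · rintro ⟨h1, h2⟩
        conv_lhs => rw [← List.take_append_drop k l]
        rw [h1]
        exact congrArg (fun x => c ++ x) h2
      · intro hEq
        have h1 : l.take k = c := by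
          conv_lhs => rw [hEq]
          simp [List.take_append, hc]
        have h2 : l.drop k = (List.replicate (pvChunks k (l.drop k)).length c).flatten := by
          conv_lhs => rw [hEq]
          simp [List.drop_append, hc]
        exact ⟨h1, h2⟩

theorem pvStrBeq (x y : String) : (x == y) = (x.toList == y.toList) := by
  by_cases h : x = y
  · simp [h]
  · have hne : x.toList ≠ y.toList := fun hh => h (String.toList_inj.mp hh)
    simp [h, hne]

theorem pvPartLoop_eq_all (p0 : String) (ps : List String) :
    pvPartLoop p0 ps = ps.all (fun p => p == p0) := by
  induction ps with
  | nil => rfl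
  | cons p rest ih =>
    by_cases h : p = p0 <;> simp [pvPartLoop, h, ih]

-- the string-level scan, read on code points
theorem pvCheck_toList (P : List String) (C : List (List Char))
    (h : P.map String.toList = C) :
    pvPartitionsCheck P = C.all (fun q => q == C.headD []) := by
  subst h
  cases P with
  | nil => rfl
  | cons p0 ps =>
    simp only [pvPartitionsCheck, pvPartLoop_eq_all, List.map_cons, List.headD_cons]
    rw [← List.map_cons, List.all_map]
    exact congrArg (fun f => (p0 :: ps).all f) (funext fun p => pvStrBeq p p0)

theorem pvStrLen (s : String) : PySem.Str.len s = (s.toList.length : Int) := by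
  simp [PySem.Str.len]

-- ===== VERDICT (by name: the statement is the Claim_ definition above) =====
theorem is_equal_partitions_spec : Claim_equal_is_equal_partitions := by
  intro s size _hdom hpre
  unfold Spec_is_equal_partitions
  rcases lt_trichotomy size 0 with hneg | hzero | hpos
  · unfold is_equal_partitions is_equal_partitions_alt
    rw [pvStrLen, pvRange_neg_nil _ _ hneg (by positivity)]
    rfl
  · exact absurd hzero hpre
  · set k := size.toNat with hkdef
    have hk0 : 0 < k := by omega
    have hks : ((k : Nat) : Int) = size := by omega
    have hparts := pvParts_eq k hk0 s.toList.length s.toList le_rfl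
    have hlenR : (PySem.List.pyRange 0 (s.toList.length : Int) ((k:Nat):Int)).length
        = (pvChunks k s.toList).length := by
      have := congrArg List.length hparts
      simpa using this
    have hmap : ((PySem.List.pyRange 0 (s.toList.length : Int) ((k:Nat):Int)).map
        (fun i => PySem.Str.slice s (some i) (some (i + ((k:Nat):Int))))).map String.toList
        = pvChunks k s.toList := by
      rw [List.map_map, ← hparts]
      apply List.map_congr_left
      intro i _
      simp [PySem.Str.toList_slice]
    have hA : is_equal_partitions s size
        = (pvChunks k s.toList).all (fun q => q == (pvChunks k s.toList).headD []) := by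
      unfold is_equal_partitions
      rw [pvStrLen, ← hks]
      exact pvCheck_toList _ _ hmap
    have htake : (PySem.Str.slice s none (some ((k:Nat):Int))).toList = s.toList.take k := by
      rw [PySem.Str.toList_slice]
      simp [PySem.List.slice_to _ (by positivity : (0:Int) ≤ ((k:Nat):Int))]
    have hB : is_equal_partitions_alt s size
        = ((((pvChunks k s.toList).length : Nat) : Int) == 0
            || (s.toList == (List.replicate (pvChunks k s.toList).length (s.toList.take k)).flatten)) := by
      unfold is_equal_partitions_alt
      show ((((PySem.List.pyRange 0 (PySem.Str.len s) size).length : Nat) : Int) == 0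
          || s == String.ofList (PySem.List.pyRepeat
                (PySem.Str.slice s none (some size)).toList
                (((PySem.List.pyRange 0 (PySem.Str.len s) size).length : Nat) : Int))) = _
      rw [pvStrLen, ← hks, hlenR, htake]
      rw [show PySem.List.pyRepeat (s.toList.take k) (((pvChunks k s.toList).length : Nat) : Int)
            = (List.replicate (pvChunks k s.toList).length (s.toList.take k)).flatten by
          simp [PySem.List.pyRepeat]]
      rw [pvStrBeq, String.toList_ofList]
    rw [hA, hB]
    rcases eq_or_ne s.toList [] with hnil | hne
    · simp [hnil, pvChunks_nil]
    · rw [pvChunks_cons k hk0 s.toList hne]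
      simp only [List.headD_cons, List.length_cons]
      rw [show ((((pvChunks k (s.toList.drop k)).length + 1 : Nat) : Int) == 0) = false by
          simp; omega]
      rw [Bool.false_or]
      by_cases hlk : s.toList.length ≤ k
      · have hdrop : s.toList.drop k = [] := List.drop_eq_nil_of_le hlk
        have htk : s.toList.take k = s.toList := List.take_of_length_le hlk
        simp [hdrop, pvChunks_nil, htk]
      · have key := pvAllEqRepeat k hk0 (s.toList.take k)
          (by rw [List.length_take]; omega) s.toList.length s.toList le_rfl
        rw [pvChunks_cons k hk0 s.toList hne] at key
        simpa using key
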